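-- pv_equiv track=rewrite | github.com/KingoftheNight/RPCT | rpct/ReadBE.py | saac_el
-- ===== SOURCE A (Python) =====
-- def AAC(PSSM_aaid):
--     aa = ['A', 'R', 'N', 'D', 'C', 'Q', 'E', 'G', 'H', 'I', 'L', 'K', 'M', 'F', 'P', 'S', 'T', 'W', 'Y', 'V']
--     all_features = []
--     for j in range(len(PSSM_aaid)):
--         line = PSSM_aaid[j]
--         aaBox = [0, 0, 0, 0, 0, 0, 0, 0, 0, 0, 0, 0, 0, 0, 0, 0, 0, 0, 0, 0]
--         for i in line:
--             if i in aa: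
--                 aaBox[aa.index(i)] += 1
--         all_features.append(aaBox)
--     return all_features
--
-- def saac_el(eachfile):
--     dN = 25
--     dC = 10
--     dN_1 = eachfile[0:4 * dN]
--     dC_1 = eachfile[-dC:]
--     dL_1 = eachfile[4 * dN:-dC]
--     all_elfs = AAC([dN_1, dL_1, dC_1])
--     out_box = []
--     for i in all_elfs:
--         out_box += i
--     return out_box
-- ===== SOURCE B (Python) =====
-- AA_ORDER = ['A', 'R', 'N', 'D', 'C', 'Q', 'E', 'G', 'H', 'I',
--             'L', 'K', 'M', 'F', 'P', 'S', 'T', 'W', 'Y', 'V']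
-- AA_IDX = {res: k for k, res in enumerate(AA_ORDER)}
--
-- def saac_el(eachfile):
--     # Single pass over the string: each character's absolute position decides
--     # which of the three segment count blocks (N: idx<100, middle: 100<=idx<n-10,
--     # C: idx>=n-10) it is added to, in one flat 60-slot accumulator.  No slicing,
--     # no per-segment rescans; overlapping segments of short strings fall out of
--     # the independent position tests.
--     n = len(eachfile)
--     box = [0] * 60
--     for idx, ch in enumerate(eachfile):
--         k = AA_IDX.get(ch)
--         if k is None:
--             continue
--         if idx < 100:
--             box[k] += 1
--         if 100 <= idx < n - 10:
--             box[20 + k] += 1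
--         if n - 10 <= idx:
--             box[40 + k] += 1
--     return box
-- ===== Notes on version B (the rewrite author's own statement) =====
-- stated objective: faster
-- what changed: Instead of slicing the string into three segments and rescanning each with a per-character membership-and-index lookup into a mutated 20-slot box, B makes a single pass over the whole string in which each character's absolute position routes its count into the right block(s) of one flat 60-slot accumulator via a precomputed residue-index dict.
import Mathlib
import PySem

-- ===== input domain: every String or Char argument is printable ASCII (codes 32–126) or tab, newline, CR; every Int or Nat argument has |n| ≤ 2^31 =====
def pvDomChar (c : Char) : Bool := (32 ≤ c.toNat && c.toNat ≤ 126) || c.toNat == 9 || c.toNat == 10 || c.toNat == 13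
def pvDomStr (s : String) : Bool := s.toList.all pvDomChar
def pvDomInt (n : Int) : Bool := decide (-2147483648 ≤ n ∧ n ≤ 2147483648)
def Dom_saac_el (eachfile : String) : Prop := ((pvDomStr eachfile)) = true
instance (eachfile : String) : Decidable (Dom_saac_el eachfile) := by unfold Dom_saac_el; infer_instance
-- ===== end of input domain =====

-- B replaces A's slice-then-scan-per-segment algorithm by a single pass over the
-- whole string in which each character's absolute position routes it into the
-- right block(s) of one flat 60-slot accumulator (objective: faster, measured
-- constant-factor: one traversal and one dict lookup per character instead of a
-- 20-element membership test plus list.index scan).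

-- ===== PORT A =====
-- the fixed amino-acid order `aa` of AAC
def pvAA : List Char :=
  ['A', 'R', 'N', 'D', 'C', 'Q', 'E', 'G', 'H', 'I',
   'L', 'K', 'M', 'F', 'P', 'S', 'T', 'W', 'Y', 'V']

-- inner loop of AAC over one line: `if i in aa: aaBox[aa.index(i)] += 1`
def pvAACLine (line : List Char) : List Int :=
  line.foldl (fun aaBox i =>
    match PySem.List.index? pvAA i with
    | some k => aaBox.set k (aaBox.getD k 0 + 1)
    | none => aaBox)
    [0, 0, 0, 0, 0, 0, 0, 0, 0, 0, 0, 0, 0, 0, 0, 0, 0, 0, 0, 0]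

-- AAC: loop over the lines, appending each aaBox
def pvAAC (pssm_aaid : List (List Char)) : List (List Int) :=
  pssm_aaid.foldl (fun all_features line => all_features ++ [pvAACLine line]) []

def saac_el (eachfile : String) : List Int :=
  let cs := eachfile.toList
  let dN : Int := 25
  let dC : Int := 10
  let dN_1 := PySem.List.slice cs (some 0) (some (4 * dN))
  let dC_1 := PySem.List.slice cs (some (-dC)) none
  let dL_1 := PySem.List.slice cs (some (4 * dN)) (some (-dC))
  let all_elfs := pvAAC [dN_1, dL_1, dC_1]
  all_elfs.foldl (fun out_box i => out_box ++ i) []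

-- ===== PORT B =====
-- AA_ORDER and AA_IDX of Source B ({res: k for k, res in enumerate(AA_ORDER)})
def pvAAOrder : List Char :=
  ['A', 'R', 'N', 'D', 'C', 'Q', 'E', 'G', 'H', 'I',
   'L', 'K', 'M', 'F', 'P', 'S', 'T', 'W', 'Y', 'V']

def pvAAIdx : PySem.Dict Char Int :=
  PySem.Dict.ofList ((PySem.List.enumerate pvAAOrder 0).map (fun p => (p.2, p.1)))

-- the body of Source B's single `for idx, ch in enumerate(eachfile)` loop
def pvStep (n : Int) (box : List Int) (p : Int × Char) : List Int :=
  match PySem.Dict.get? pvAAIdx p.2 with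
  | none => box
  | some k =>
    -- k is one of the dict's literal values 0..19, so .toNat is exact here
    let box := if p.1 < 100 then box.set k.toNat (box.getD k.toNat 0 + 1) else box
    let box := if 100 ≤ p.1 ∧ p.1 < n - 10 then
        box.set (20 + k).toNat (box.getD (20 + k).toNat 0 + 1) else box
    if n - 10 ≤ p.1 then box.set (40 + k).toNat (box.getD (40 + k).toNat 0 + 1) else box

def saac_el_alt (eachfile : String) : List Int :=
  let cs := eachfile.toList
  let n : Int := cs.length
  (PySem.List.enumerate cs 0).foldl (pvStep n) (List.replicate 60 0)

-- ===== PRECONDITION & SPEC =====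
def Spec_saac_el (eachfile : String) (out : List Int) : Prop := out = saac_el_alt eachfile
instance (eachfile : String) (out : List Int) : Decidable (Spec_saac_el eachfile out) := by unfold Spec_saac_el; infer_instance

-- ===== CLAIM (what is proved, stated in full; the proofs are below) =====
def Claim_equal_saac_el : Prop := ∀ (eachfile : String), Dom_saac_el eachfile → Spec_saac_el eachfile (saac_el eachfile)

-- ===== LEMMAS AND PROOFS =====

theorem pvAA_nodup : pvAA.Nodup := by decide

-- the precomputed index dict looks up exactly `aa.index`
theorem pvAAIdx_get (c : Char) :
    PySem.Dict.get? pvAAIdx c = (PySem.List.index? pvAA c).map (fun k => (k : Int)) := by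
  by_cases hc : c ∈ pvAA
  · simp only [pvAA, List.mem_cons, List.not_mem_nil, or_false] at hc
    rcases hc with rfl|rfl|rfl|rfl|rfl|rfl|rfl|rfl|rfl|rfl|rfl|rfl|rfl|rfl|rfl|rfl|rfl|rfl|rfl|rfl <;> decide
  · have h1 : PySem.List.index? pvAA c = none := (PySem.List.index?_eq_none_iff _ _).mpr hc
    have h2 : PySem.Dict.get? pvAAIdx c = none := by
      rw [PySem.Dict.get?_eq_none_iff_not_mem_keys]
      have hk : (PySem.Dict.keys pvAAIdx) = pvAA := by decide
      rw [hk]; exact hc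
    rw [h1, h2]; rfl

-- setting position k of a mapped nodup list = mapping a pointwise-updated function
theorem set_map_nodup {a b : Type} [DecidableEq a] (l : List a) (f : a -> b) (k : Nat)
    (hk : k < l.length) (hnd : l.Nodup) (v : b) :
    (l.map f).set k v = l.map (fun c => if c = l[k] then v else f c) := by
  apply List.ext_getElem
  . simp
  . intro j hj hj'
    simp only [List.length_map] at hj'
    rw [List.getElem_set, List.getElem_map, List.getElem_map]
    by_cases h : k = j
    . subst h; simp
    . have hne : l[j] != l[k] := by
        simp only [bne_iff_ne, ne_eq]
        intro he
        exact h (((List.Nodup.getElem_inj_iff hnd).mp he).symm)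
      simp only [bne_iff_ne, ne_eq] at hne
      simp [h, hne]

-- A's per-line scan computes pointwise counts over the 20-residue order
theorem pvAACLine_invariant (line : List Char) (f : Char -> Int) :
    line.foldl (fun aaBox i =>
      match PySem.List.index? pvAA i with
      | some k => aaBox.set k (aaBox.getD k 0 + 1)
      | none => aaBox) (pvAA.map f)
    = pvAA.map (fun c => f c + (line.count c : Int)) := by
  induction line generalizing f with
  | nil => simp
  | cons i rest ih =>
    simp only [List.foldl_cons]
    by_cases hi : i ∈ pvAA
    . obtain ⟨k, hk⟩ : ∃ k, PySem.List.index? pvAA i = some k := by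
        rw [← Option.isSome_iff_exists, PySem.List.index?_isSome_iff]
        exact hi
      obtain ⟨hklt, hgi, -⟩ := PySem.List.getElem_of_index?_eq_some hk
      rw [hk]
      have hget : (pvAA.map f).getD k 0 = f pvAA[k] := by
        rw [List.getD_eq_getElem _ _ (by simpa using hklt), List.getElem_map]
      simp only [hget]
      rw [set_map_nodup pvAA f k hklt pvAA_nodup, ih]
      apply List.map_congr_left
      intro c _
      by_cases hc : c = i
      . subst hc
        simp [hgi]
        ring
      . have : c ≠ pvAA[k] := by rw [hgi]; exact hc
        simp [this, List.count_cons]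
        exact fun he => hc he.symm
    . have hk : PySem.List.index? pvAA i = none := by
        rw [PySem.List.index?_eq_none_iff]; exact hi
      rw [hk, ih]
      apply List.map_congr_left
      intro c hc
      have : c ≠ i := fun he => hi (he ▸ hc)
      simp [List.count_cons]
      exact fun he => this he.symm

-- the single-pass invariant for B's loop: starting at absolute index j with a
-- 3x20 state of pointwise values, the loop adds each block's segment counts

-- block arithmetic on the flat 3x20 accumulator
theorem getD_block (t : List Int) (f : Char → Int) (k : Nat) (hk : k < pvAA.length) :
    (pvAA.map f ++ t).getD k 0 = f pvAA[k] := by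
  rw [List.getD_append _ _ _ k (by simpa using hk),
    List.getD_eq_getElem _ _ (by simpa using hk), List.getElem_map]

theorem set_block (t : List Int) (f : Char → Int) (k : Nat) (hk : k < pvAA.length) (v : Int) :
    (pvAA.map f ++ t).set k v
      = pvAA.map (fun c => if c = pvAA[k] then v else f c) ++ t := by
  rw [List.set_append, if_pos (by simpa using hk), set_map_nodup pvAA f k hk pvAA_nodup]

theorem getD_skip (t : List Int) (f : Char → Int) (m : Nat) :
    (pvAA.map f ++ t).getD (20 + m) 0 = t.getD m 0 := by
  rw [List.getD_append_right _ _ _ _ (by simp [pvAA])]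
  simp [pvAA]

theorem set_skip (t : List Int) (f : Char → Int) (m : Nat) (v : Int) :
    (pvAA.map f ++ t).set (20 + m) v = pvAA.map f ++ t.set m v := by
  rw [List.set_append, if_neg (by simp [pvAA])]
  simp [pvAA]

theorem getD_last (f : Char → Int) (k : Nat) (hk : k < pvAA.length) :
    (pvAA.map f).getD k 0 = f pvAA[k] := by
  rw [List.getD_eq_getElem _ _ (by simpa using hk), List.getElem_map]

theorem set_last (f : Char → Int) (k : Nat) (hk : k < pvAA.length) (v : Int) :
    (pvAA.map f).set k v = pvAA.map (fun c => if c = pvAA[k] then v else f c) :=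
  set_map_nodup pvAA f k hk pvAA_nodup v

-- one step of B's loop on a 3-block pointwise state
theorem pvStep_eq (n : Int) (j : Int) (x : Char) (fN fM fC : Char → Int) :
    pvStep n (pvAA.map fN ++ (pvAA.map fM ++ pvAA.map fC)) (j, x)
    = pvAA.map (fun c => if j < 100 ∧ c = x then fN c + 1 else fN c)
      ++ (pvAA.map (fun c => if (100 ≤ j ∧ j < n - 10) ∧ c = x then fM c + 1 else fM c)
      ++ pvAA.map (fun c => if n - 10 ≤ j ∧ c = x then fC c + 1 else fC c)) := by
  by_cases hx : x ∈ pvAA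
  · obtain ⟨k, hk⟩ : ∃ k, PySem.List.index? pvAA x = some k := by
      rw [← Option.isSome_iff_exists, PySem.List.index?_isSome_iff]; exact hx
    obtain ⟨hklt, hgk, -⟩ := PySem.List.getElem_of_index?_eq_some hk
    have hsome : PySem.Dict.get? pvAAIdx x = some ((k : Int)) := by
      rw [pvAAIdx_get, hk]; rfl
    simp only [pvStep, hsome]
    have htn1 : ((k : Int)).toNat = k := by omega
    have htn2 : ((20 + (k : Int))).toNat = 20 + k := by omega
    have htn3 : ((40 + (k : Int))).toNat = 40 + k := by omega
    have h40 : (40 : Nat) + k = 20 + (20 + k) := by omega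
    -- first conditional update
    have hU1 : (if j < 100 then
          (pvAA.map fN ++ (pvAA.map fM ++ pvAA.map fC)).set ((k : Int)).toNat
            ((pvAA.map fN ++ (pvAA.map fM ++ pvAA.map fC)).getD ((k : Int)).toNat 0 + 1)
        else pvAA.map fN ++ (pvAA.map fM ++ pvAA.map fC))
        = pvAA.map (fun c => if j < 100 ∧ c = x then fN c + 1 else fN c)
          ++ (pvAA.map fM ++ pvAA.map fC) := by
      rw [htn1]
      by_cases hg : j < 100
      · rw [if_pos hg, getD_block _ _ _ hklt, set_block _ _ _ hklt, hgk]
        apply congrArg (· ++ (pvAA.map fM ++ pvAA.map fC))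
        apply List.map_congr_left
        intro c _
        by_cases hcx : c = x <;> simp [hcx, hg]
      · rw [if_neg hg]
        apply congrArg (· ++ (pvAA.map fM ++ pvAA.map fC))
        apply List.map_congr_left
        intro c _
        simp [hg]
    rw [hU1]
    -- second conditional update
    have hU2 : ∀ (g : Char → Int), (if 100 ≤ j ∧ j < n - 10 then
          (pvAA.map g ++ (pvAA.map fM ++ pvAA.map fC)).set ((20 + (k : Int))).toNat
            ((pvAA.map g ++ (pvAA.map fM ++ pvAA.map fC)).getD ((20 + (k : Int))).toNat 0 + 1)
        else pvAA.map g ++ (pvAA.map fM ++ pvAA.map fC))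
        = pvAA.map g
          ++ (pvAA.map (fun c => if (100 ≤ j ∧ j < n - 10) ∧ c = x then fM c + 1 else fM c)
          ++ pvAA.map fC) := by
      intro g
      rw [htn2]
      by_cases hg : 100 ≤ j ∧ j < n - 10
      · rw [if_pos hg, getD_skip, set_skip, getD_block _ _ _ hklt, set_block _ _ _ hklt, hgk]
        apply congrArg (pvAA.map g ++ ·)
        apply congrArg (· ++ pvAA.map fC)
        apply List.map_congr_left
        intro c _
        by_cases hcx : c = x <;> simp [hcx, hg]
      · rw [if_neg hg]
        apply congrArg (pvAA.map g ++ ·)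
        apply congrArg (· ++ pvAA.map fC)
        apply List.map_congr_left
        intro c _
        simp [hg]
    rw [hU2]
    -- third conditional update
    have hU3 : ∀ (g g' : Char → Int), (if n - 10 ≤ j then
          (pvAA.map g ++ (pvAA.map g' ++ pvAA.map fC)).set ((40 + (k : Int))).toNat
            ((pvAA.map g ++ (pvAA.map g' ++ pvAA.map fC)).getD ((40 + (k : Int))).toNat 0 + 1)
        else pvAA.map g ++ (pvAA.map g' ++ pvAA.map fC))
        = pvAA.map g
          ++ (pvAA.map g'
          ++ pvAA.map (fun c => if n - 10 ≤ j ∧ c = x then fC c + 1 else fC c)) := by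
      intro g g'
      rw [htn3, h40]
      by_cases hg : n - 10 ≤ j
      · rw [if_pos hg, getD_skip, getD_skip, set_skip, set_skip,
          getD_last _ _ hklt, set_last _ _ hklt, hgk]
        apply congrArg (pvAA.map g ++ ·)
        apply congrArg (pvAA.map g' ++ ·)
        apply List.map_congr_left
        intro c _
        by_cases hcx : c = x <;> simp [hcx, hg]
      · rw [if_neg hg]
        apply congrArg (pvAA.map g ++ ·)
        apply congrArg (pvAA.map g' ++ ·)
        apply List.map_congr_left
        intro c _
        simp [hg]
    rw [hU3]
  · have hnone : PySem.Dict.get? pvAAIdx x = none := by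
      rw [pvAAIdx_get, (PySem.List.index?_eq_none_iff _ _).mpr hx]; rfl
    simp only [pvStep, hnone]
    refine congrArg₂ _ ?_ (congrArg₂ _ ?_ ?_) <;>
    · symm
      apply List.map_congr_left
      intro c hc
      have hcx : c ≠ x := fun he => hx (he ▸ hc)
      simp [hcx]

theorem pvStep_invariant (l : List Char) (n : Int) (j : Nat) (fN fM fC : Char → Int) :
    (PySem.List.enumerate l (j : Int)).foldl (pvStep n)
        (pvAA.map fN ++ (pvAA.map fM ++ pvAA.map fC))
    = pvAA.map (fun c => fN c + ((l.take (100 - j)).count c : Int))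
      ++ (pvAA.map (fun c => fM c + ((((l.take ((n - 10).toNat - j)).drop (100 - j)).count c : Int)))
      ++ pvAA.map (fun c => fC c + ((l.drop ((n - 10).toNat - j)).count c : Int))) := by
  induction l generalizing j fN fM fC with
  | nil => simp
  | cons x rest ih =>
    rw [PySem.List.enumerate_cons, List.foldl_cons, pvStep_eq]
    have hj1 : ((j : Int) + 1) = ((j + 1 : Nat) : Int) := by push_cast; ring
    rw [hj1, ih]
    congr 1
    · -- N block
      apply List.map_congr_left
      intro c _
      by_cases h1 : j < 100
      · have hg : ((j : Int) < 100) := by omega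
        rw [show 100 - j = (100 - (j + 1)) + 1 from by omega, List.take_succ_cons,
          List.count_cons]
        by_cases hcx : c = x
        · rw [if_pos ⟨hg, hcx⟩]
          subst hcx
          simp only [beq_self_eq_true, if_true]
          push_cast
          ring
        · rw [if_neg (fun h => hcx h.2)]
          have hxc : (x == c) = false := by simp [Ne.symm hcx]
          simp [hxc]
      · rw [if_neg (fun h => absurd h.1 (by omega)),
          show 100 - j = 0 from by omega, show 100 - (j + 1) = 0 from by omega]
        simp
    congr 1
    · -- middle block
      apply List.map_congr_left
      intro c _
      by_cases h1 : j < 100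
      · rw [if_neg (fun h => absurd h.1 (by omega))]
        by_cases h2 : j < (n - 10).toNat
        · rw [show (n - 10).toNat - j = ((n - 10).toNat - (j + 1)) + 1 from by omega,
            List.take_succ_cons,
            show 100 - j = (100 - (j + 1)) + 1 from by omega, List.drop_succ_cons]
        · rw [show (n - 10).toNat - j = 0 from by omega,
            show (n - 10).toNat - (j + 1) = 0 from by omega]
          simp
      · by_cases h2 : j < (n - 10).toNat
        · have hg : (100 : Int) ≤ (j : Int) ∧ (j : Int) < n - 10 := by omega
          rw [show (n - 10).toNat - j = ((n - 10).toNat - (j + 1)) + 1 from by omega,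
            List.take_succ_cons,
            show 100 - j = 0 from by omega, show 100 - (j + 1) = 0 from by omega,
            List.drop_zero, List.drop_zero, List.count_cons]
          by_cases hcx : c = x
          · rw [if_pos ⟨hg, hcx⟩]
            subst hcx
            simp only [beq_self_eq_true, if_true]
            push_cast
            ring
          · rw [if_neg (fun h => hcx h.2)]
            have hxc : (x == c) = false := by simp [Ne.symm hcx]
            simp [hxc]
        · rw [if_neg (fun h => absurd h.2 (by omega)),
            show (n - 10).toNat - j = 0 from by omega,
            show (n - 10).toNat - (j + 1) = 0 from by omega]
          simp
    · -- C block
      apply List.map_congr_left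
      intro c _
      by_cases h2 : j < (n - 10).toNat
      · rw [if_neg (fun h => absurd h.1 (by omega)),
          show (n - 10).toNat - j = ((n - 10).toNat - (j + 1)) + 1 from by omega,
          List.drop_succ_cons]
      · have hg : n - 10 ≤ (j : Int) := by omega
        rw [show (n - 10).toNat - j = 0 from by omega,
          show (n - 10).toNat - (j + 1) = 0 from by omega,
          List.drop_zero, List.drop_zero, List.count_cons]
        by_cases hcx : c = x
        · rw [if_pos ⟨hg, hcx⟩]
          subst hcx
          simp only [beq_self_eq_true, if_true]
          push_cast
          ring
        · rw [if_neg (fun h => hcx h.2)]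
          have hxc : (x == c) = false := by simp [Ne.symm hcx]
          simp [hxc]

-- ===== VERDICT (by name: the statement is the Claim_ definition above) =====
theorem saac_el_spec : Claim_equal_saac_el := by
  intro eachfile _
  unfold Spec_saac_el saac_el saac_el_alt pvAAC
  simp only [List.foldl_cons, List.foldl_nil, List.nil_append, List.cons_append]
  have hline : ∀ line : List Char,
      pvAACLine line = pvAA.map (fun c => (0 : Int) + (line.count c : Int)) := by
    intro line
    unfold pvAACLine
    rw [show ([0, 0, 0, 0, 0, 0, 0, 0, 0, 0, 0, 0, 0, 0, 0, 0, 0, 0, 0, 0] : List Int)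
        = pvAA.map (fun _ => (0 : Int)) from by decide]
    exact pvAACLine_invariant line _
  have hrep : (List.replicate 60 (0 : Int))
      = pvAA.map (fun _ => (0 : Int)) ++ (pvAA.map (fun _ => (0 : Int)) ++ pvAA.map (fun _ => (0 : Int))) := by
    decide
  have hinv := pvStep_invariant eachfile.toList (eachfile.toList.length : Int) 0
    (fun _ => (0 : Int)) (fun _ => (0 : Int)) (fun _ => (0 : Int))
  simp only [Nat.cast_zero, Nat.sub_zero] at hinv
  have h425 : (4 * 25 : Int) = 100 := by norm_num
  have hs1 : PySem.List.slice eachfile.toList (some 0) (some (4 * 25))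
      = eachfile.toList.take 100 := by
    rw [h425, PySem.List.slice_zero_start, PySem.List.slice_to _ (by norm_num)]
    simp
  have hs2 : PySem.List.slice eachfile.toList (some (4 * 25)) (some (-10))
      = List.drop 100 (List.take (((eachfile.toList.length : Int) - 10).toNat) eachfile.toList) := by
    rw [h425]
    have ha : PySem.List.clampIdx eachfile.toList.length 100 = min 100 eachfile.toList.length := by
      unfold PySem.List.clampIdx; split_ifs <;> omega
    have hb : PySem.List.clampIdx eachfile.toList.length (-10)
        = ((eachfile.toList.length : Int) - 10).toNat := by
      unfold PySem.List.clampIdx; split_ifs <;> omega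
    simp only [PySem.List.slice, ha, hb]
    rw [List.drop_take]
    rcases Nat.lt_or_ge eachfile.toList.length 100 with h|h
    · rw [List.take_eq_nil_iff.mpr (by omega), List.take_eq_nil_iff.mpr (by omega)]
    · rw [min_eq_left h]
  have hs3 : PySem.List.slice eachfile.toList (some (-10)) none
      = List.drop (((eachfile.toList.length : Int) - 10).toNat) eachfile.toList := by
    rw [PySem.List.slice_from_neg_ofNat eachfile.toList 10 (by norm_num),
      show (((eachfile.toList.length : Int) - 10).toNat) = eachfile.toList.length - 10 from by omega]
  rw [hs1, hs2, hs3, hline, hline, hline, List.append_assoc, hrep, hinv]
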